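-- pv_equiv track=rewrite | github.com/AnandaRachmawati/Phyton | Praktikum Dasar Pemograman/daspro listt.py | gaji
-- ===== SOURCE A (Python) =====
-- def first_elmt(L):
--     return L[0]
--
-- def Tail(L):
--     return L[1:]
--
-- def isEmpty(L):
--     if L == []:
--         return True
--     else:
--         return False
--
-- def gaji(A, B):
--     if isEmpty(A) or isEmpty(B):
--         return 0
--     if first_elmt(A) > first_elmt(B):
--         return 1 + gaji(Tail(A), Tail(B))
--     elif first_elmt(A) < first_elmt(B):
--         return -1 + gaji(Tail(A), Tail(B))
--     else:
--         return gaji(Tail(A), Tail(B))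
-- ===== SOURCE B (Python) =====
-- def gaji(A, B):
--     return sum((a > b) - (a < b) for a, b in zip(A, B))
-- ===== Notes on version B (the rewrite author's own statement) =====
-- stated objective: faster
-- what changed: Replaced the recursive descent with repeated list slicing (quadratic copying) by a single pass over zip(A,B) summing sign comparisons.
import Mathlib
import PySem

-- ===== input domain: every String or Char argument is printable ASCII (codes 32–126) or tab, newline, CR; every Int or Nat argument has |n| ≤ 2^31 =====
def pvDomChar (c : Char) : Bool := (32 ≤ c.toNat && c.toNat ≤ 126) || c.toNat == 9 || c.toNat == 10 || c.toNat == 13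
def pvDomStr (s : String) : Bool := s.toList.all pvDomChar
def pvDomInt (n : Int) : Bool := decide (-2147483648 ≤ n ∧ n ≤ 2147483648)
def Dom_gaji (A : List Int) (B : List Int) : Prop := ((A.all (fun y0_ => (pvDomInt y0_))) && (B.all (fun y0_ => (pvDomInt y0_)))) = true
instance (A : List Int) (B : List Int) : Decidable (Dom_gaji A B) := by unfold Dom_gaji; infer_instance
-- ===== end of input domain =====

-- B replaces A's recursive descent with repeated list slicing by a single fold over zip(A,B) summing sign comparisons (faster: asymptotic, O(n) vs O(n^2) copying).


-- ===== PORT A =====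
-- first_elmt: L[0]; only called after the isEmpty guard, so the IndexError case never occurs;
-- .getD 0 is the total reading of that always-some lookup
def firstElmt (L : List Int) : Int := (PySem.List.pyGet? L 0).getD 0
-- Tail: L[1:]
def pyTail (L : List Int) : List Int := PySem.List.slice L (some 1) none
def pyIsEmpty (L : List Int) : Bool := L == []

def gaji (A : List Int) (B : List Int) : Int :=
  if pyIsEmpty A || pyIsEmpty B then 0
  else if firstElmt A > firstElmt B then 1 + gaji (pyTail A) (pyTail B)
  else if firstElmt A < firstElmt B then -1 + gaji (pyTail A) (pyTail B)
  else gaji (pyTail A) (pyTail B)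
termination_by A.length
decreasing_by
  all_goals
    simp [pyIsEmpty, pyTail, PySem.List.slice_from_one] at *
    cases A <;> simp_all

-- ===== PORT B =====
def gaji_alt (A : List Int) (B : List Int) : Int :=
  (A.zip B).foldl (fun acc p =>
    acc + ((if p.1 > p.2 then (1:Int) else 0) - (if p.1 < p.2 then (1:Int) else 0))) 0

-- ===== PRECONDITION & SPEC =====
def Spec_gaji (A : List Int) (B : List Int) (out : Int) : Prop := out = gaji_alt A B
instance (A : List Int) (B : List Int) (out : Int) : Decidable (Spec_gaji A B out) := by unfold Spec_gaji; infer_instance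

-- ===== CLAIM (what is proved, stated in full; the proofs are below) =====
def Claim_equal_gaji : Prop := ∀ (A : List Int) (B : List Int), Dom_gaji A B → Spec_gaji A B (gaji A B)

-- ===== LEMMAS AND PROOFS =====
theorem foldl_shift (g : Int × Int → Int) (l : List (Int × Int)) (c : Int) :
    l.foldl (fun acc p => acc + g p) c = c + l.foldl (fun acc p => acc + g p) 0 := by
  induction l generalizing c with
  | nil => simp
  | cons p t ih => rw [List.foldl_cons, List.foldl_cons, ih, ih (0 + g p)]; ring

theorem firstElmt_cons (a : Int) (A : List Int) : firstElmt (a :: A) = a := by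
  simp [firstElmt, PySem.List.pyGet?, PySem.List.pyIdx?]

theorem gaji_alt_cons (a b : Int) (A B : List Int) :
    gaji_alt (a :: A) (b :: B) =
      ((if a > b then (1:Int) else 0) - (if a < b then (1:Int) else 0)) + gaji_alt A B := by
  simp only [gaji_alt, List.zip_cons_cons, List.foldl_cons]
  rw [foldl_shift (fun p => (if p.1 > p.2 then (1:Int) else 0) - if p.1 < p.2 then (1:Int) else 0)]
  ring_nf

theorem gaji_eq_alt (A B : List Int) : gaji A B = gaji_alt A B := by
  induction A generalizing B with
  | nil => simp [gaji, pyIsEmpty, gaji_alt]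
  | cons a A ih =>
    cases B with
    | nil => simp [gaji, pyIsEmpty, gaji_alt]
    | cons b B =>
      rw [gaji, gaji_alt_cons]
      simp only [pyIsEmpty, pyTail, PySem.List.slice_from_one, firstElmt_cons]
      simp [ih]
      split_ifs <;> omega

-- ===== VERDICT (by name: the statement is the Claim_ definition above) =====
theorem gaji_spec : Claim_equal_gaji := by
  intro A B _
  unfold Spec_gaji
  exact gaji_eq_alt A B
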